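-- pv_equiv track=rewrite | github.com/lawanfalalu/class_exercises | 40527_A1.py | MU
-- ===== SOURCE A (Python) =====
-- def MU(m):
--     if(isSquare(m)):
--         zeros_diagonal = zeros_matrix(len(m), len(m))
--         for i in range(0, len(m)):
--             for j in range(i+1, len(m)):
--                 zeros_diagonal[i][j]= -m[i][j]
--         return zeros_diagonal
--     else:
--         print ("Must be a square matrix")
--
-- def isSquare(m):
--     return  all(len(row) == len(m) for row in m)
--
-- def zeros_matrix(dim1, dim2):
--     result=[]
--     for i in range(dim1):
--         aRow = []
--         for j in range(dim2):
--             aRow.append(0)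
--         result.append(aRow)
--     return result
-- ===== SOURCE B (Python) =====
-- def MU(m):
--     if any(len(row) != len(m) for row in m):
--         print("Must be a square matrix")
--         return None
--     return _neg_upper(m)
--
--
-- def _neg_upper(m):
--     # Recursive peel: first row is 0 followed by the negated tail; the rest is
--     # the answer for the minor (drop first row and first column) with a 0
--     # column glued back on the left.
--     if not m:
--         return []
--     first = [0] + [-x for x in m[0][1:]]
--     rest = _neg_upper([row[1:] for row in m[1:]])
--     return [first] + [[0] + r for r in rest]
-- ===== Notes on version B (the rewrite author's own statement) =====
-- stated objective: alternative
-- what changed: B replaces A's zero-fill-then-overwrite double loop by a recursive divide-and-conquer: peel off the first row and column, recurse on the (n-1)x(n-1) minor, and glue a zero column back on.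
import Mathlib
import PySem

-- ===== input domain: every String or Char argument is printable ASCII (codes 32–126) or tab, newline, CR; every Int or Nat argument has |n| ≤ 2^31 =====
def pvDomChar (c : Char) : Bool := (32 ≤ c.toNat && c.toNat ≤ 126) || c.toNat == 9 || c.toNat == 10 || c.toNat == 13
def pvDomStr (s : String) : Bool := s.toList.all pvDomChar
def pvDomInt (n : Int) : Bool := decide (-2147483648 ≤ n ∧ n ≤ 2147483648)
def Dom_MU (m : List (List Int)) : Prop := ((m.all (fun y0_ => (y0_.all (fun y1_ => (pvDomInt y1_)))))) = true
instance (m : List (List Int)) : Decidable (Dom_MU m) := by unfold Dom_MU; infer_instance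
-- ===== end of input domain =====

-- B computes the result by recursive peeling of the first row and column instead of A's
-- zero-fill-then-overwrite loops; equivalence of return values (A also prints on the
-- non-square branch, modelled as `none`).

-- ===== PORT A =====
-- isSquare(m)
def isSquareA (m : List (List Int)) : Bool :=
  m.all (fun row => row.length == m.length)

-- zeros_matrix(dim1, dim2): the two append-accumulating loops
def zerosMatrixA (dim1 dim2 : Nat) : List (List Int) :=
  (List.range dim1).foldl
    (fun result _ =>
      result ++ [(List.range dim2).foldl (fun aRow _ => aRow ++ [(0 : Int)]) []])
    []

-- m[i][j]: indices are nonnegative and in range on the square branch, so getD is exact there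
def MU (m : List (List Int)) : Option (List (List Int)) :=
  if isSquareA m then
    some ((List.range m.length).foldl
      (fun mat i =>
        -- range(i+1, len(m))
        (List.range' (i+1) (m.length - (i+1))).foldl
          (fun mat2 j =>
            mat2.set i ((mat2.getD i []).set j (-((m.getD i []).getD j 0))))
          mat)
      (zerosMatrixA m.length m.length))
  else none

-- ===== PORT B =====
-- _neg_upper(m); row[1:] on a list is List.drop 1 (exact: nonnegative slice start)
def negUpperB (m : List (List Int)) : List (List Int) :=
  match m with
  | [] => []
  | r :: rs =>
      ((0 : Int) :: (r.drop 1).map (fun x => -x)) ::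
        (negUpperB (rs.map (fun row => row.drop 1))).map (fun row => (0 : Int) :: row)
termination_by m.length
decreasing_by simp

def MU_alt (m : List (List Int)) : Option (List (List Int)) :=
  if m.any (fun row => !(row.length == m.length)) then none
  else some (negUpperB m)

-- ===== PRECONDITION & SPEC =====
def Spec_MU (m : List (List Int)) (out : Option (List (List Int))) : Prop := out = MU_alt m
instance (m : List (List Int)) (out : Option (List (List Int))) : Decidable (Spec_MU m out) := by unfold Spec_MU; infer_instance

-- ===== CLAIM (what is proved, stated in full; the proofs are below) =====
def Claim_equal_MU : Prop := ∀ (m : List (List Int)), Dom_MU m → Spec_MU m (MU m)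

-- ===== LEMMAS AND PROOFS =====

-- appending x in a counted loop is replicate
lemma foldl_append_const {α : Type} (d : Nat) (x : α) (init : List α) :
    (List.range d).foldl (fun r _ => r ++ [x]) init = init ++ List.replicate d x := by
  induction d generalizing init with
  | zero => simp
  | succ d ih =>
      rw [List.range_succ, List.foldl_append]
      simp [ih, List.replicate_succ']

lemma zerosMatrixA_eq (d1 d2 : Nat) :
    zerosMatrixA d1 d2 = List.replicate d1 (List.replicate d2 (0 : Int)) := by
  unfold zerosMatrixA
  rw [foldl_append_const d1]
  simp [foldl_append_const d2]

lemma getD_set (r : List Int) (i : Nat) (v : Int) (k : Nat) :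
    (r.set i v).getD k 0 = if i = k ∧ k < r.length then v else r.getD k 0 := by
  rcases Nat.lt_or_ge k r.length with hk | hk
  · by_cases h : i = k
    · subst h
      simp [hk]
    · simp [h]
  · have h1 : (r.set i v).length ≤ k := by simpa using hk
    have hni : ¬ (i = k ∧ k < r.length) := by omega
    have e1 : (r.set i v)[k]? = none := List.getElem?_eq_none h1
    have e2 : r[k]? = none := List.getElem?_eq_none hk
    simp [List.getD_eq_getElem?_getD, e1, e2, hni]

lemma len_foldl_set (js : List Nat) (f : Nat → Int) (row : List Int) :
    (js.foldl (fun r j => r.set j (f j)) row).length = row.length := by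
  induction js generalizing row with
  | nil => rfl
  | cons j js ih => simp [List.foldl_cons, ih]

lemma getD_foldl_set (l : Nat) (s : Nat) (f : Nat → Int) (row : List Int) (k : Nat) :
    ((List.range' s l).foldl (fun r j => r.set j (f j)) row).getD k 0
      = if s ≤ k ∧ k < s + l ∧ k < row.length then f k else row.getD k 0 := by
  induction l generalizing s row with
  | zero =>
      have h0 : ¬ (s ≤ k ∧ k < s + 0 ∧ k < row.length) := by omega
      rw [List.range'_zero, List.foldl_nil, if_neg h0]
  | succ l ih =>
      rw [List.range'_succ, List.foldl_cons, ih]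
      rw [getD_set]
      simp only [List.length_set]
      split_ifs with c1 c2 c3 c4 c5
      · rfl
      · omega
      · rw [c3.1]
      · exact absurd c3 (by omega)
      · exact absurd c5 (by omega)
      · rfl

-- the matrix-level inner loop only touches row i
lemma foldl_set_row (js : List Nat) (i : Nat) (f : Nat → Int) (mat : List (List Int))
    (hi : i < mat.length) :
    js.foldl (fun mat2 j => mat2.set i ((mat2.getD i []).set j (f j))) mat
      = mat.set i (js.foldl (fun row j => row.set j (f j)) (mat.getD i [])) := by
  induction js generalizing mat with
  | nil =>
      simp only [List.foldl_nil]
      rw [List.getD_eq_getElem _ _ hi, List.set_getElem_self]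
  | cons j js ih =>
      simp only [List.foldl_cons]
      rw [ih _ (by simpa using hi), List.set_set]
      have hrow : (mat.set i ((mat.getD i []).set j (f j))).getD i []
          = (mat.getD i []).set j (f j) := by
        rw [List.getD_eq_getElem _ _ (by simpa using hi), List.getElem_set_self]
      rw [hrow]

-- the cell both versions compute
def cellB (m : List (List Int)) (i j : Nat) : Int :=
  if i < j then -((m.getD i []).getD j 0) else 0

-- state of A's outer loop after the first k iterations
def targ (m : List (List Int)) (k : Nat) : List (List Int) :=
  (List.range m.length).map (fun i =>
    if i < k then (List.range m.length).map (fun j => cellB m i j)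
    else List.replicate m.length 0)

lemma targ_length (m : List (List Int)) (k : Nat) : (targ m k).length = m.length := by
  simp [targ]

lemma targ_getD (m : List (List Int)) (k i : Nat) (hi : i < m.length) :
    (targ m k).getD i []
      = if i < k then (List.range m.length).map (fun j => cellB m i j)
        else List.replicate m.length 0 := by
  unfold targ
  rw [List.getD_eq_getElem _ _ (by simpa using hi)]
  simp

lemma inner_row (m : List (List Int)) (k : Nat) (hk : k < m.length) :
    (List.range' (k+1) (m.length - (k+1))).foldl
        (fun row j => row.set j (-((m.getD k []).getD j 0)))
        (List.replicate m.length 0)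
      = (List.range m.length).map (fun j => cellB m k j) := by
  apply List.ext_getElem
  · simp [len_foldl_set]
  · intro j h1 h2
    have hj : j < m.length := by simpa [len_foldl_set] using h1
    have hrep : ((List.replicate m.length (0:Int))).getD j 0 = 0 := by
      rw [List.getD_eq_getElem _ _ (by simpa using hj)]; simp
    have hR : (List.map (fun j => cellB m k j) (List.range m.length))[j] = cellB m k j := by
      simp
    rw [hR, ← List.getD_eq_getElem _ (0:Int) h1, getD_foldl_set]
    unfold cellB
    by_cases h : k < j
    · have hc : k + 1 ≤ j ∧ j < k + 1 + (m.length - (k+1)) ∧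
          j < (List.replicate m.length (0:Int)).length := by
        simp only [List.length_replicate]; omega
      rw [if_pos hc, if_pos h]
    · have hc : ¬ (k + 1 ≤ j ∧ j < k + 1 + (m.length - (k+1)) ∧
          j < (List.replicate m.length (0:Int)).length) := by
        simp only [List.length_replicate]; omega
      rw [if_neg hc, if_neg h, hrep]

lemma targ_step (m : List (List Int)) (k : Nat) (hk : k < m.length) :
    (targ m k).set k ((List.range m.length).map (fun j => cellB m k j)) = targ m (k+1) := by
  apply List.ext_getElem
  · simp [targ]
  · intro i h1 h2
    have hi : i < m.length := by simpa [targ] using h2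
    by_cases h : i = k
    · subst h
      rw [List.getElem_set_self (by simpa [targ] using hi)]
      simp [targ]
    · rw [List.getElem_set_ne (by omega)]
      simp only [targ, List.getElem_map, List.getElem_range]
      have : i < k + 1 ↔ i < k := by omega
      simp [this]

lemma outer_fold (m : List (List Int)) (k : Nat) (hk : k ≤ m.length) :
    (List.range k).foldl
      (fun mat i =>
        (List.range' (i+1) (m.length - (i+1))).foldl
          (fun mat2 j =>
            mat2.set i ((mat2.getD i []).set j (-((m.getD i []).getD j 0))))
          mat)
      (zerosMatrixA m.length m.length)
      = targ m k := by
  induction k with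
  | zero =>
      rw [zerosMatrixA_eq]
      unfold targ
      apply List.ext_getElem
      · simp
      · intro i h1 h2
        simp
  | succ k ih =>
      have hk' : k < m.length := by omega
      rw [List.range_succ, List.foldl_append, ih (by omega)]
      simp only [List.foldl_cons, List.foldl_nil]
      rw [foldl_set_row _ _ _ _ (by rw [targ_length]; exact hk')]
      rw [targ_getD m k k hk', if_neg (lt_irrefl k)]
      rw [inner_row m k hk']
      exact targ_step m k hk'

-- B's recursion computes exactly the cellwise matrix on square input
lemma negUpperB_eq (n : Nat) : ∀ (m : List (List Int)), m.length = n →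
    (∀ row ∈ m, row.length = n) →
    negUpperB m = (List.range n).map (fun i =>
      (List.range n).map (fun j => cellB m i j)) := by
  induction n with
  | zero =>
      intro m hl _
      have : m = [] := List.eq_nil_of_length_eq_zero hl
      subst this
      simp [negUpperB]
  | succ n ih =>
      intro m hl hrows
      match m, hl with
      | r :: rs, hl =>
        have hrs : rs.length = n := by simpa using hl
        have hr : r.length = n + 1 := hrows r (by simp)
        have hsubrows : ∀ row ∈ rs.map (fun row => row.drop 1), row.length = n := by
          intro row hrow
          rcases List.mem_map.1 hrow with ⟨row0, h0, rfl⟩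
          have := hrows row0 (by simp [h0])
          simp [this]
        rw [negUpperB]
        rw [ih (rs.map (fun row => row.drop 1)) (by simp [hrs]) hsubrows]
        rw [List.range_succ_eq_map]
        simp only [List.map_cons, List.map_map]
        congr 1
        · -- first row
          apply List.ext_getElem
          · simp [hr]
          · intro j h1 h2
            have hj : j < n + 1 := by simpa using h2
            match j with
            | 0 => simp [cellB]
            | (j+1) =>
                have hj' : j + 1 < r.length := by omega
                have hjd : j < (r.drop 1).length := by simp [hr]; omega
                simp only [List.getElem_cons_succ, List.getElem_map, List.getElem_range,
                  Function.comp_apply]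
                unfold cellB
                rw [if_pos (by omega)]
                have e : ((r :: rs).getD 0 []).getD (j+1) 0 = r[j+1]'hj' := by
                  simp [List.getElem?_eq_getElem hj']
                have e3 : 1 + j = j + 1 := by omega
                rw [e, List.getElem_drop]
                simp [e3]
        · -- remaining rows
          apply List.map_congr_left
          intro i hi
          rw [List.mem_range] at hi
          simp only [Function.comp_apply]
          have hhead : cellB (r :: rs) (i+1) 0 = 0 := by simp [cellB]
          rw [hhead]
          congr 1
          apply List.map_congr_left
          intro j hj
          rw [List.mem_range] at hj
          simp only [Function.comp_apply]
          unfold cellB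
          have hrsi : i < rs.length := by omega
          have hlen : rs[i].length = n + 1 := hrows rs[i] (by simp [List.getElem_mem])
          have hsub : ((rs.map (fun row => row.drop 1)).getD i []).getD j 0
              = ((r :: rs).getD (i+1) []).getD (j+1) 0 := by
            have e1 : (rs.map (fun row => row.drop 1)).getD i [] = rs[i].drop 1 := by
              rw [List.getD_eq_getElem _ _ (by simpa using hrsi)]; simp
            have e2 : (r :: rs).getD (i+1) [] = rs[i] := by
              rw [List.getD_eq_getElem _ _ (by simp; omega)]; simp
            rw [e1, e2]
            have hj1 : j + 1 < rs[i].length := by omega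
            have hjd : j < (rs[i].drop 1).length := by simp [hlen]; omega
            have e3 : 1 + j = j + 1 := by omega
            rw [List.getD_eq_getElem _ _ hjd, List.getD_eq_getElem _ _ hj1,
              List.getElem_drop]
            simp [e3]
          rw [hsub]
          by_cases hij : i < j
          · rw [if_pos hij, if_pos (by omega)]
          · rw [if_neg hij, if_neg (by omega)]

lemma guard_eq (m : List (List Int)) :
    (m.any (fun row => !(row.length == m.length)) = false)
      ↔ (m.all (fun row => row.length == m.length) = true) := by
  simp [List.any_eq_false, List.all_eq_true]

-- ===== VERDICT (by name: the statement is the Claim_ definition above) =====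
theorem MU_spec : Claim_equal_MU := by
  intro m _
  unfold Spec_MU MU MU_alt isSquareA
  by_cases h : m.all (fun row => row.length == m.length)
  · have hg : m.any (fun row => !(row.length == m.length)) = false := (guard_eq m).2 h
    simp only [h, hg, if_true, Bool.false_eq_true, if_false]
    rw [outer_fold m m.length le_rfl]
    have hrows : ∀ row ∈ m, row.length = m.length := by
      intro row hrow
      have := List.all_eq_true.1 h row hrow
      simpa using this
    rw [negUpperB_eq m.length m rfl hrows]
    unfold targ
    apply congrArg
    apply List.map_congr_left
    intro i hi
    rw [List.mem_range] at hi
    simp [hi]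
  · have hg : m.any (fun row => !(row.length == m.length)) = true := by
      rcases List.any_eq_false.not.1 (fun hf => h ((guard_eq m).1 hf)) with _
      cases he : m.any (fun row => !(row.length == m.length))
      · exact absurd ((guard_eq m).1 he) h
      · rfl
    simp [h, hg]
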